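-- pv_equiv track=rewrite | github.com/canelhasmateus/leet | signal/003-/commonCharacterCount.py | solution
-- ===== SOURCE A (Python) =====
-- def solution( param1, param2 ):
--
-- 	counts = {}
--
-- 	for left in param1:
-- 		counts[ left ] = counts.get( left, 0 ) + 1
--
-- 	total = 0
-- 	for right in param2:
-- 		current_count = counts.get( right, 0 )
-- 		if current_count > 0:
-- 			total += 1
-- 			counts[ right ] = current_count - 1
--
--
-- 	return total
-- ===== SOURCE B (Python) =====
-- def solution(param1, param2):
--     counts1 = {}
--     for ch in param1:
--         counts1[ch] = counts1.get(ch, 0) + 1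
--     counts2 = {}
--     for ch in param2:
--         counts2[ch] = counts2.get(ch, 0) + 1
--     total = 0
--     for ch in counts1:
--         c1 = counts1[ch]
--         c2 = counts2.get(ch, 0)
--         total += c1 if c1 < c2 else c2
--     return total
-- ===== Notes on version B (the rewrite author's own statement) =====
-- stated objective: idiomatic
-- what changed: A decrements a shared frequency table while scanning param2; B builds two independent frequency tables and then sums min(counts1[c], counts2.get(c,0)) over the distinct characters of param1.
import Mathlib
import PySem

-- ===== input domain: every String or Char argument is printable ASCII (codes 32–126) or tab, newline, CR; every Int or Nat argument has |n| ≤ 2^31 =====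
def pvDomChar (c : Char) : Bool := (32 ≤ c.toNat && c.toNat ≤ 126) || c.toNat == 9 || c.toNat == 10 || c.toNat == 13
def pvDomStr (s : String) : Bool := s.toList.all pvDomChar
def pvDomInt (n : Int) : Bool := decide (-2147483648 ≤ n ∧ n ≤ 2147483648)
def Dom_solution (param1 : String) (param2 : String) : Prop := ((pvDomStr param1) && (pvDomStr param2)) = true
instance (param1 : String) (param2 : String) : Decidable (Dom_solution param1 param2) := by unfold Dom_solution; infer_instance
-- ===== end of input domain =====

-- B builds two independent frequency tables and sums per-character minima, instead of A's
-- decrement-while-scanning loop; objective: more idiomatic decomposition (same cost).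

-- ===== PORT A =====
def solution (param1 : String) (param2 : String) : Int :=
  let counts := param1.toList.foldl
    (fun (d : PySem.Dict Char Int) left => d.insert left (d.getD left 0 + 1)) PySem.Dict.empty
  let st := param2.toList.foldl
    (fun (s : PySem.Dict Char Int × Int) right =>
      let current_count := s.1.getD right 0
      if current_count > 0 then (s.1.insert right (current_count - 1), s.2 + 1) else s)
    (counts, 0)
  st.2

-- ===== PORT B =====
def solution_alt (param1 : String) (param2 : String) : Int :=
  let counts1 := param1.toList.foldl
    (fun (d : PySem.Dict Char Int) ch => d.insert ch (d.getD ch 0 + 1)) PySem.Dict.empty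
  let counts2 := param2.toList.foldl
    (fun (d : PySem.Dict Char Int) ch => d.insert ch (d.getD ch 0 + 1)) PySem.Dict.empty
  counts1.keys.foldl
    (fun total ch =>
      let c1 := counts1.getD ch 0
      let c2 := counts2.getD ch 0
      total + (if c1 < c2 then c1 else c2)) 0

-- ===== PRECONDITION & SPEC =====
def Spec_solution (param1 : String) (param2 : String) (out : Int) : Prop := out = solution_alt param1 param2
instance (param1 : String) (param2 : String) (out : Int) : Decidable (Spec_solution param1 param2 out) := by unfold Spec_solution; infer_instance

-- ===== CLAIM (what is proved, stated in full; the proofs are below) =====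
def Claim_equal_solution : Prop := ∀ (param1 : String) (param2 : String), Dom_solution param1 param2 → Spec_solution param1 param2 (solution param1 param2)

-- ===== LEMMAS AND PROOFS =====

-- A's second loop: total gained = ∑ over the distinct chars of t of min(remaining count, multiplicity in t)
lemma loopA (t : List Char) (d : PySem.Dict Char Int) (tot : Int)
    (hd : ∀ c, 0 ≤ d.getD c 0) :
    (t.foldl
      (fun (s : PySem.Dict Char Int × Int) right =>
        let current_count := s.1.getD right 0
        if current_count > 0 then (s.1.insert right (current_count - 1), s.2 + 1) else s)
      (d, tot)).2
    = tot + ∑ c ∈ t.toFinset, min (d.getD c 0) ((t.count c : Int)) := by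
  induction t generalizing d tot with
  | nil => simp
  | cons c rest ih =>
    simp only [List.foldl_cons]
    by_cases hv : d.getD c 0 > 0
    · simp only [hv, if_pos]
      rw [ih (d.insert c (d.getD c 0 - 1)) (tot + 1)
            (by intro x; rw [PySem.Dict.getD_insert]; split_ifs with h
                · omega
                · exact hd x)]
      by_cases hc : c ∈ rest
      · have hins : (c :: rest).toFinset = rest.toFinset := by
          simp [List.toFinset_cons, hc]
        rw [hins]
        rw [← Finset.add_sum_erase rest.toFinset
              (fun x => min ((d.insert c (d.getD c 0 - 1)).getD x 0) ((rest.count x : Int)))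
              (List.mem_toFinset.mpr hc),
            ← Finset.add_sum_erase rest.toFinset
              (fun x => min (d.getD x 0) (((c :: rest).count x : Int)))
              (List.mem_toFinset.mpr hc)]
        have hsum : ∑ x ∈ rest.toFinset.erase c,
            min ((d.insert c (d.getD c 0 - 1)).getD x 0) ((rest.count x : Int))
          = ∑ x ∈ rest.toFinset.erase c,
            min (d.getD x 0) (((c :: rest).count x : Int)) := by
          refine Finset.sum_congr rfl ?_
          intro x hx
          have hxc : x ≠ c := Finset.ne_of_mem_erase hx
          rw [PySem.Dict.getD_insert]
          simp [hxc, Ne.symm hxc]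
        rw [hsum]
        have : min ((d.insert c (d.getD c 0 - 1)).getD c 0) ((rest.count c : Int)) + 1
             = min (d.getD c 0) (((c :: rest).count c : Int)) := by
          rw [PySem.Dict.getD_insert]
          simp only [List.count_cons_self]
          push_cast
          omega
        omega
      · rw [List.toFinset_cons,
            Finset.sum_insert (by simpa using hc)]
        have h0 : rest.count c = 0 := List.count_eq_zero.mpr hc
        have hsum : ∑ x ∈ rest.toFinset,
            min ((d.insert c (d.getD c 0 - 1)).getD x 0) ((rest.count x : Int))
          = ∑ x ∈ rest.toFinset,
            min (d.getD x 0) (((c :: rest).count x : Int)) := by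
          refine Finset.sum_congr rfl ?_
          intro x hx
          have hxc : x ≠ c := by rintro rfl; exact hc (List.mem_toFinset.mp hx)
          rw [PySem.Dict.getD_insert]
          simp [hxc, Ne.symm hxc]
        have : min (d.getD c 0) (((c :: rest).count c : Int)) = 1 := by
          simp only [List.count_cons_self, h0]
          push_cast
          omega
        omega
    · simp only [hv, if_false]
      rw [ih d tot hd]
      have hv0 : d.getD c 0 = 0 := le_antisymm (by omega) (hd c)
      by_cases hc : c ∈ rest
      · have hins : (c :: rest).toFinset = rest.toFinset := by
          simp [List.toFinset_cons, hc]
        rw [hins]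
        have hsum : ∑ x ∈ rest.toFinset, min (d.getD x 0) ((rest.count x : Int))
          = ∑ x ∈ rest.toFinset, min (d.getD x 0) (((c :: rest).count x : Int)) := by
          refine Finset.sum_congr rfl ?_
          intro x hx
          by_cases hxc : x = c
          · subst hxc
            simp only [hv0, List.count_cons_self]
            push_cast
            omega
          · simp [Ne.symm hxc]
        omega
      · rw [List.toFinset_cons, Finset.sum_insert (by simpa using hc)]
        have hsum : ∑ x ∈ rest.toFinset, min (d.getD x 0) ((rest.count x : Int))
          = ∑ x ∈ rest.toFinset, min (d.getD x 0) (((c :: rest).count x : Int)) := by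
          refine Finset.sum_congr rfl ?_
          intro x hx
          have hxc : x ≠ c := by rintro rfl; exact hc (List.mem_toFinset.mp hx)
          simp [Ne.symm hxc]
        have : min (d.getD c 0) (((c :: rest).count c : Int)) = 0 := by
          simp only [hv0]
          omega
        omega

-- the common value: ∑ over distinct chars of l1 ++ l2 of min of the two multiplicities
lemma sum_union_eq_left (l1 l2 : List Char) :
    ∑ c ∈ l1.toFinset, min ((l1.count c : Int)) ((l2.count c : Int))
    = ∑ c ∈ (l1 ++ l2).toFinset, min ((l1.count c : Int)) ((l2.count c : Int)) := by
  rw [List.toFinset_append]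
  refine Finset.sum_subset Finset.subset_union_left ?_
  intro x _ hx
  have h0 : l1.count x = 0 := List.count_eq_zero.mpr (by simpa using hx)
  simp only [h0, Nat.cast_zero]
  omega

lemma sum_union_eq_right (l1 l2 : List Char) :
    ∑ c ∈ l2.toFinset, min ((l1.count c : Int)) ((l2.count c : Int))
    = ∑ c ∈ (l1 ++ l2).toFinset, min ((l1.count c : Int)) ((l2.count c : Int)) := by
  rw [List.toFinset_append]
  refine Finset.sum_subset Finset.subset_union_right ?_
  intro x _ hx
  have h0 : l2.count x = 0 := List.count_eq_zero.mpr (by simpa using hx)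
  simp only [h0, Nat.cast_zero]
  omega

theorem solution_eq (param1 param2 : String) : solution param1 param2 = solution_alt param1 param2 := by
  have eqA : solution param1 param2
      = ∑ c ∈ param2.toList.toFinset,
          min ((param1.toList.count c : Int)) ((param2.toList.count c : Int)) := by
    unfold solution
    rw [loopA param2.toList _ 0 (by
        intro x
        rw [PySem.Dict.getD_foldl_insert_add_one, PySem.Dict.getD_empty]
        positivity)]
    rw [zero_add]
    refine Finset.sum_congr rfl ?_
    intro c _
    rw [PySem.Dict.getD_foldl_insert_add_one, PySem.Dict.getD_empty, zero_add]
  have eqB : solution_alt param1 param2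
      = ∑ c ∈ param1.toList.toFinset,
          min ((param1.toList.count c : Int)) ((param2.toList.count c : Int)) := by
    unfold solution_alt
    simp only [PySem.Dict.foldl_insert_getD_add_one_eq_counter, PySem.Dict.keys_counter]
    rw [PySem.List.foldl_add (PySem.Set.ofList param1.toList)
          (fun k => if (PySem.Dict.counter param1.toList).getD k 0 < (PySem.Dict.counter param2.toList).getD k 0
                    then (PySem.Dict.counter param1.toList).getD k 0
                    else (PySem.Dict.counter param2.toList).getD k 0) 0]
    rw [zero_add, ← List.sum_toFinset _ (PySem.Set.nodup_ofList param1.toList)]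
    have hkeys : (PySem.Set.ofList param1.toList).toFinset = param1.toList.toFinset := by
      ext x; simp [PySem.Set.mem_ofList]
    rw [hkeys]
    refine Finset.sum_congr rfl ?_
    intro c _
    rw [PySem.Dict.getD_counter, PySem.Dict.getD_counter]
    omega
  rw [eqA, eqB, sum_union_eq_right param1.toList param2.toList,
      ← sum_union_eq_left param1.toList param2.toList]

-- ===== VERDICT (by name: the statement is the Claim_ definition above) =====
theorem solution_spec : Claim_equal_solution := by
  intro p1 p2 _
  unfold Spec_solution
  exact solution_eq p1 p2
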